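-- pv_equiv track=rewrite | github.com/zakiyawilliams617/Python- | Module 12/elimination.py | total_games_from_source
-- ===== SOURCE A (Python) =====
-- def total_games_from_source(x, n, games):
--     total = 0
--     i = 0
--     while i < n:
--         if i != x:
--             j = i + 1
--             while j < n:
--                 if j != x:
--                     total = total + games[i][j]
--                 j = j + 1
--         i = i + 1
--     return total
-- ===== SOURCE B (Python) =====
-- def total_games_from_source(x, n, games):
--     # total-then-remove: sum the whole strict upper triangle, then subtract
--     # the row-x tail and column-x head if x lies inside [0, n)
--     total = sum(games[i][j] for i in range(n) for j in range(i + 1, n))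
--     if 0 <= x < n:
--         total -= sum(games[x][j] for j in range(x + 1, n))
--         total -= sum(games[i][x] for i in range(x))
--     return total
-- ===== Notes on version B (the rewrite author's own statement) =====
-- stated objective: alternative
-- what changed: A skips row/column x inside a nested accumulate-while-skipping loop; B sums the whole strict upper triangle in one pass and then subtracts the row-x tail and column-x head only when 0 <= x < n (total-then-remove).
-- outside the precondition, e.g. on total_games_from_source(0, 2, [[], [5, 6]]): A returns 0, B raises IndexError
import Mathlib
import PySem

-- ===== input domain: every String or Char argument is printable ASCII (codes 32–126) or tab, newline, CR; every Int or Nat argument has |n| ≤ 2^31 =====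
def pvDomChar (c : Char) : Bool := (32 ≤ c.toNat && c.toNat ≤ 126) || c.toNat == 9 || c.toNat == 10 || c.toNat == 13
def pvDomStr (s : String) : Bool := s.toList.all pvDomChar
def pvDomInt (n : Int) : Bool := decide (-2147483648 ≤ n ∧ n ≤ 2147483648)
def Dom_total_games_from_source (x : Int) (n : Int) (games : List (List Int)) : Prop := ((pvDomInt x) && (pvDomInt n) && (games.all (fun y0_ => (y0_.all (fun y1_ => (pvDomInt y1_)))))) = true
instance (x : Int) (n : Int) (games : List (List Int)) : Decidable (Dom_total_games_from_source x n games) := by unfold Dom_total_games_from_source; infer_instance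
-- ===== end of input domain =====

-- B replaces A's skip-while-accumulating double loop by a total-then-remove decomposition:
-- sum the whole strict upper triangle, then subtract row x's tail and column x's head.

-- ===== PORT A =====
def total_games_from_source (x : Int) (n : Int) (games : List (List Int)) : Int :=
  (PySem.List.pyRange 0 n).foldl
    (fun total i =>
      if i ≠ x then
        (PySem.List.pyRange (i + 1) n).foldl
          (fun total j =>
            if j ≠ x then total + PySem.List.pyGetD (PySem.List.pyGetD games i []) j 0
            else total)
          total
      else total)
    0

-- ===== PORT B =====
def total_games_from_source_alt (x : Int) (n : Int) (games : List (List Int)) : Int :=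
  let total :=
    ((PySem.List.pyRange 0 n).map (fun i =>
      ((PySem.List.pyRange (i + 1) n).map
        (fun j => PySem.List.pyGetD (PySem.List.pyGetD games i []) j 0)).sum)).sum
  if 0 ≤ x ∧ x < n then
    total
      - ((PySem.List.pyRange (x + 1) n).map
          (fun j => PySem.List.pyGetD (PySem.List.pyGetD games x []) j 0)).sum
      - ((PySem.List.pyRange 0 x).map
          (fun i => PySem.List.pyGetD (PySem.List.pyGetD games i []) x 0)).sum
  else total

-- ===== PRECONDITION & SPEC =====
-- Pre_ requires the whole n×n upper triangle to be addressable (n rows of length ≥ n).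
-- It excludes ragged inputs on which A happens to return only because row/column x is
-- skipped — B's full-triangle pass raises IndexError there.
def Pre_total_games_from_source (x : Int) (n : Int) (games : List (List Int)) : Prop :=
  n ≤ games.length ∧ ∀ row ∈ games.take n.toNat, n ≤ row.length
instance (x : Int) (n : Int) (games : List (List Int)) : Decidable (Pre_total_games_from_source x n games) := by unfold Pre_total_games_from_source; infer_instance

def pvWitness_total_games_from_source : Int × Int × List (List Int) := (0, 2, [[1, 2], [3, 4]])

def Spec_total_games_from_source (x : Int) (n : Int) (games : List (List Int)) (out : Int) : Prop := out = total_games_from_source_alt x n games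
instance (x : Int) (n : Int) (games : List (List Int)) (out : Int) : Decidable (Spec_total_games_from_source x n games out) := by unfold Spec_total_games_from_source; infer_instance

-- ===== CLAIM (what is proved, stated in full; the proofs are below) =====
def Claim_equal_total_games_from_source : Prop := ∀ (x : Int) (n : Int) (games : List (List Int)), Dom_total_games_from_source x n games → Pre_total_games_from_source x n games → Spec_total_games_from_source x n games (total_games_from_source x n games)

-- ===== LEMMAS AND PROOFS =====
lemma pyRange_empty {a b : Int} (h : b ≤ a) : PySem.List.pyRange a b = [] := by
  simp only [PySem.List.pyRange]; split <;> simp_all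

lemma pyRange_split (x a n : Int) (h1 : a ≤ x) (h2 : x ≤ n) :
    PySem.List.pyRange a n = PySem.List.pyRange a x ++ PySem.List.pyRange x n := by
  have key : ∀ (k : Nat) (a : Int), (x - a).toNat = k → a ≤ x →
      PySem.List.pyRange a n = PySem.List.pyRange a x ++ PySem.List.pyRange x n := by
    intro k
    induction k with
    | zero => intro a hk ha
              have : a = x := by omega
              subst this; rw [pyRange_empty le_rfl]; rfl
    | succ m ih => intro a hk ha
                   have hax : a < x := by omega
                   rw [PySem.List.pyRange_one_cons (lt_of_lt_of_le hax h2),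
                       PySem.List.pyRange_one_cons hax,
                       ih (a+1) (by omega) (by omega)]
                   rfl
  exact key (x - a).toNat a rfl h1

lemma sum_map_sub (l : List Int) (f h : Int → Int) :
    (l.map (fun i => f i - h i)).sum = (l.map f).sum - (l.map h).sum := by
  induction l with
  | nil => simp
  | cons a t ih => simp [ih]; ring

lemma filter_ne_of_not_mem {x : Int} {l : List Int} (h : ∀ i ∈ l, i ≠ x) :
    l.filter (fun i => decide (i ≠ x)) = l :=
  List.filter_eq_self.2 (fun i hi => by simpa using h i hi)

lemma filter_split (x : Int) (lo hi : List Int) (hlo : ∀ i ∈ lo, i ≠ x) (hhi : ∀ i ∈ hi, i ≠ x) :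
    (lo ++ x :: hi).filter (fun i => decide (i ≠ x)) = lo ++ hi := by
  rw [List.filter_append, List.filter_cons, filter_ne_of_not_mem hlo,
      filter_ne_of_not_mem hhi]
  simp

-- A's double loop with its two skip tests is the sum over the x-filtered index ranges.
lemma A_char (x n : Int) (games : List (List Int)) :
    total_games_from_source x n games =
      (((PySem.List.pyRange 0 n).filter (fun i => decide (i ≠ x))).map
        (fun i => (((PySem.List.pyRange (i + 1) n).filter (fun j => decide (j ≠ x))).map
          (fun j => PySem.List.pyGetD (PySem.List.pyGetD games i []) j 0)).sum)).sum := by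
  unfold total_games_from_source
  rw [PySem.List.foldl_ite_eq_foldl_filter (p := fun i => i ≠ x)]
  rw [PySem.List.foldl_congr_mem _ _
      (fun total i => total + (((PySem.List.pyRange (i + 1) n).filter (fun j => decide (j ≠ x))).map
          (fun j => PySem.List.pyGetD (PySem.List.pyGetD games i []) j 0)).sum) _
      (fun acc i _ => by
        rw [PySem.List.foldl_ite_eq_foldl_filter (p := fun j => j ≠ x),
            PySem.List.foldl_add])]
  rw [PySem.List.foldl_add]
  simp

-- The two ports agree on every input (Pre_ is only needed for faithfulness to Python).
theorem main_eq (x n : Int) (games : List (List Int)) :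
    total_games_from_source x n games = total_games_from_source_alt x n games := by
  rw [A_char]
  simp only [total_games_from_source_alt]
  by_cases h : 0 ≤ x ∧ x < n
  · rw [if_pos h]
    have hsplit : PySem.List.pyRange 0 n
        = PySem.List.pyRange 0 x ++ x :: PySem.List.pyRange (x + 1) n := by
      rw [pyRange_split x 0 n h.1 (le_of_lt h.2), PySem.List.pyRange_one_cons h.2]
    have hlo : ∀ i ∈ PySem.List.pyRange 0 x, i ≠ x := fun i hi => by
      have := PySem.List.mem_pyRange_one.1 hi; omega
    have hhi : ∀ i ∈ PySem.List.pyRange (x + 1) n, i ≠ x := fun i hi => by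
      have := PySem.List.mem_pyRange_one.1 hi; omega
    rw [hsplit, filter_split x _ _ hlo hhi, List.map_append, List.sum_append]
    have hinnerLo : (PySem.List.pyRange 0 x).map
        (fun i => (((PySem.List.pyRange (i + 1) n).filter (fun j => decide (j ≠ x))).map
          (fun j => PySem.List.pyGetD (PySem.List.pyGetD games i []) j 0)).sum)
        = (PySem.List.pyRange 0 x).map
        (fun i => ((PySem.List.pyRange (i + 1) n).map
          (fun j => PySem.List.pyGetD (PySem.List.pyGetD games i []) j 0)).sum
          - PySem.List.pyGetD (PySem.List.pyGetD games i []) x 0) := by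
      apply List.map_congr_left
      intro i hi
      have hib := PySem.List.mem_pyRange_one.1 hi
      have hsp : PySem.List.pyRange (i + 1) n
          = PySem.List.pyRange (i + 1) x ++ x :: PySem.List.pyRange (x + 1) n := by
        rw [pyRange_split x (i + 1) n (by omega) (le_of_lt h.2),
            PySem.List.pyRange_one_cons h.2]
      have h1 : ∀ j ∈ PySem.List.pyRange (i + 1) x, j ≠ x := fun j hj => by
        have := PySem.List.mem_pyRange_one.1 hj; omega
      rw [hsp, filter_split x _ _ h1 hhi, List.map_append, List.sum_append,
          List.map_append, List.map_cons, List.sum_append, List.sum_cons]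
      ring
    have hinnerHi : (PySem.List.pyRange (x + 1) n).map
        (fun i => (((PySem.List.pyRange (i + 1) n).filter (fun j => decide (j ≠ x))).map
          (fun j => PySem.List.pyGetD (PySem.List.pyGetD games i []) j 0)).sum)
        = (PySem.List.pyRange (x + 1) n).map
        (fun i => ((PySem.List.pyRange (i + 1) n).map
          (fun j => PySem.List.pyGetD (PySem.List.pyGetD games i []) j 0)).sum) := by
      apply List.map_congr_left
      intro i hi
      have hib := PySem.List.mem_pyRange_one.1 hi
      rw [filter_ne_of_not_mem (fun j hj => by
        have := PySem.List.mem_pyRange_one.1 hj; omega)]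
    rw [hinnerLo, hinnerHi, sum_map_sub, List.map_append, List.map_cons, List.sum_append,
        List.sum_cons]
    ring
  · rw [if_neg h]
    have hOuter : (PySem.List.pyRange 0 n).filter (fun i => decide (i ≠ x))
        = PySem.List.pyRange 0 n :=
      filter_ne_of_not_mem (fun i hi => by
        have := PySem.List.mem_pyRange_one.1 hi; omega)
    rw [hOuter]
    apply congrArg List.sum
    apply List.map_congr_left
    intro i hi
    have hib := PySem.List.mem_pyRange_one.1 hi
    rw [filter_ne_of_not_mem (fun j hj => by
      have := PySem.List.mem_pyRange_one.1 hj; omega)]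

-- ===== VERDICT (by name: the statement is the Claim_ definition above) =====
theorem total_games_from_source_spec : Claim_equal_total_games_from_source := by
  intro x n games _ _
  exact main_eq x n games
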